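-- pv_equiv track=rewrite | github.com/pinren/morphism-mapper | scripts/update_morphism_db.py | infer_domain_tags
-- ===== SOURCE A (Python) =====
-- from typing import Dict, List
--
-- def infer_domain_tags(
--     morphisms: List[Dict[str, str]],
--     tags_config: Dict[str, Dict],
--     top_k: int = 3,
-- ) -> List[str]:
--     """基于标签 indicators 从 Core Morphisms 推断领域标签。"""
--     scores: Dict[str, float] = {}
--
--     for morphism in morphisms:
--         text = f"{morphism.get('name', '')} {morphism.get('dynamics', '')}".lower()
--         for tag_id, cfg in tags_config.items():
--             indicators = cfg.get("indicators", [])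
--             hit = sum(1 for kw in indicators if isinstance(kw, str) and kw and kw.lower() in text)
--             if hit:
--                 scores[tag_id] = scores.get(tag_id, 0.0) + hit
--
--     if not scores:
--         return []
--
--     ranked = sorted(scores.items(), key=lambda kv: kv[1], reverse=True)
--     return [tag for tag, _ in ranked[:top_k]]
-- ===== SOURCE B (Python) =====
-- def infer_domain_tags(morphisms, tags_config, top_k=3):
--     """Text-driven multi-pattern matching: all lowercased keywords go into one hash set;
--     each morphism text is scanned once per distinct keyword length, probing every window
--     against that set, so the per-keyword substring scans of the naive version disappear."""
--     kws_per_tag = [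
--         (tag_id, [kw.lower() for kw in cfg.get("indicators", [])
--                   if isinstance(kw, str) and kw])
--         for tag_id, cfg in tags_config.items()
--     ]
--     all_kws = set(kw for _, kws in kws_per_tag for kw in kws)
--     lengths = sorted({len(kw) for kw in all_kws})
--
--     scores = {}
--     for morphism in morphisms:
--         text = f"{morphism.get('name', '')} {morphism.get('dynamics', '')}".lower()
--         matched = set()
--         for L in lengths:
--             for i in range(len(text) - L + 1):
--                 window = text[i:i + L]
--                 if window in all_kws:
--                     matched.add(window)
--         for tag_id, kws in kws_per_tag:
--             hit = sum(1 for kw in kws if kw in matched)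
--             if hit:
--                 scores[tag_id] = scores.get(tag_id, 0.0) + hit
--
--     if not scores:
--         return []
--     ranked = sorted(scores.items(), key=lambda kv: kv[1], reverse=True)
--     return [tag for tag, _ in ranked[:top_k]]
-- ===== Notes on version B (the rewrite author's own statement) =====
-- stated objective: alternative
-- what changed: B inverts the matching direction: instead of scanning the text once per (tag, keyword) with Python's substring 'in', it puts all lowercased keywords into one hash set and scans each text once per distinct keyword length, probing every window against the set to collect the matched keywords; tags are then tallied by set membership, so the per-keyword substring scans disappear.
import Mathlib
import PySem

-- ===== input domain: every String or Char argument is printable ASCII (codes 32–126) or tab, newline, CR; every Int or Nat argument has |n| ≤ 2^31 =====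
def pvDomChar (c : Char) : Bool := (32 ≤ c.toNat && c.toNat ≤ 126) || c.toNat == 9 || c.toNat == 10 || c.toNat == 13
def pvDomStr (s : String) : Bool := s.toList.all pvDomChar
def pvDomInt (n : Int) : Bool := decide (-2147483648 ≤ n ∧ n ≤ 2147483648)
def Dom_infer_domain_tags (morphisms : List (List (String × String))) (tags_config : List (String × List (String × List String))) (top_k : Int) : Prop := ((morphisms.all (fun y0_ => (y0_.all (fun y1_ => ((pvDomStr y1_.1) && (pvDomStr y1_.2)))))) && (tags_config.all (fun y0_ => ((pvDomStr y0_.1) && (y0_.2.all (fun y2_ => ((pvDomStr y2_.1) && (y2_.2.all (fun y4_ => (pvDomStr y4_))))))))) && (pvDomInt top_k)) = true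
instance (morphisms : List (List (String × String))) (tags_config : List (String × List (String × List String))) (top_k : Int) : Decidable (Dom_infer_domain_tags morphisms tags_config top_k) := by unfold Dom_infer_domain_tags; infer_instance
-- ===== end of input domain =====

-- B replaces A's per-keyword substring scans by text-driven matching: all lowercased
-- keywords go into one hash set, each text is scanned once per distinct keyword length
-- probing every window against that set (objective: alternative).

-- ===== PORT A =====
-- Both Pythons build the morphism text with the same f-string; ported once, on List Char
-- (Lean's own String.append is kernel-opaque), exact for any strings.
def pvText (m : List (String × String)) : List Char :=
  PySem.Chars.lower
    ((PySem.Dict.getD ⟨m⟩ "name" "").toList ++ [' '] ++ (PySem.Dict.getD ⟨m⟩ "dynamics" "").toList)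

-- Port of A. `scores` values are Python floats that always hold exact integer counts
-- (0.0 + int sums); ported as Int, exact on the whole domain.
-- `tags_config.items()` iterates the dict in insertion order = the association list itself.
def infer_domain_tags (morphisms : List (List (String × String))) (tags_config : List (String × List (String × List String))) (top_k : Int) : List String :=
  let scores : PySem.Dict String Int :=
    morphisms.foldl (fun sc morphism =>
      let text := pvText morphism
      tags_config.foldl (fun sc e =>
        let indicators := PySem.Dict.getD ⟨e.2⟩ "indicators" []
        let hit : Int :=
          ((indicators.filter (fun kw =>
              kw != "" && PySem.Chars.isIn (PySem.Chars.lower kw.toList) text)).length : Nat)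
        if hit ≠ 0 then sc.insert e.1 (sc.getD e.1 0 + hit) else sc) sc)
      PySem.Dict.empty
  if scores.items = [] then []
  else
    (PySem.List.slice (PySem.List.sorted scores.items (fun kv => kv.2) true) none (some top_k)).map
      (fun kv => kv.1)

-- ===== PORT B =====
-- B-side helper: one tag's cleaned, lowercased keyword list (the per-tag comprehension).
def pvKws (e : String × List (String × List String)) : List (List Char) :=
  ((PySem.Dict.getD ⟨e.2⟩ "indicators" []).filter (fun kw => kw != "")).map
    (fun kw => PySem.Chars.lower kw.toList)

-- B-side helper: the window-scan loops — for each keyword length, every window of the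
-- text is probed against the keyword set; hits are collected in `matched`.
def pvMatched (all_kws : PySem.Set (List Char)) (lengths : List Int) (text : List Char) :
    PySem.Set (List Char) :=
  lengths.foldl (fun mt L =>
    (PySem.List.pyRange 0 ((text.length : Int) - L + 1)).foldl (fun mt i =>
      let window := PySem.List.slice text (some i) (some (i + L))
      if all_kws.contains window then PySem.Set.add mt window else mt) mt)
    PySem.Set.empty

-- Port of B: keyword set and distinct lengths once; per morphism one window scan per
-- length builds `matched`, then tags are tallied by set membership.
def infer_domain_tags_alt (morphisms : List (List (String × String))) (tags_config : List (String × List (String × List String))) (top_k : Int) : List String :=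
  let kws_per_tag : List (String × List (List Char)) :=
    tags_config.map (fun e => (e.1, pvKws e))
  let all_kws : PySem.Set (List Char) :=
    PySem.Set.ofList (kws_per_tag.flatMap (fun p => p.2))
  let lengths : List Int :=
    PySem.List.sorted (PySem.Set.ofList (all_kws.map (fun kw => (kw.length : Int))))
      (fun x => x) false
  let scores : PySem.Dict String Int :=
    morphisms.foldl (fun sc morphism =>
      let text := pvText morphism
      let matched := pvMatched all_kws lengths text
      kws_per_tag.foldl (fun sc p =>
        let hit : Int := (p.2.countP (fun kw => matched.contains kw) : Nat)
        if hit ≠ 0 then sc.insert p.1 (sc.getD p.1 0 + hit) else sc) sc)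
      PySem.Dict.empty
  if scores.items = [] then []
  else
    (PySem.List.slice (PySem.List.sorted scores.items (fun kv => kv.2) true) none (some top_k)).map
      (fun kv => kv.1)

-- ===== PRECONDITION & SPEC =====
def Spec_infer_domain_tags (morphisms : List (List (String × String))) (tags_config : List (String × List (String × List String))) (top_k : Int) (out : List String) : Prop := out = infer_domain_tags_alt morphisms tags_config top_k
instance (morphisms : List (List (String × String))) (tags_config : List (String × List (String × List String))) (top_k : Int) (out : List String) : Decidable (Spec_infer_domain_tags morphisms tags_config top_k out) := by unfold Spec_infer_domain_tags; infer_instance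

-- ===== CLAIM (what is proved, stated in full; the proofs are below) =====
def Claim_equal_infer_domain_tags : Prop := ∀ (morphisms : List (List (String × String))) (tags_config : List (String × List (String × List String))) (top_k : Int), Dom_infer_domain_tags morphisms tags_config top_k → Spec_infer_domain_tags morphisms tags_config top_k (infer_domain_tags morphisms tags_config top_k)

-- ===== LEMMAS AND PROOFS =====

-- Membership in the inner window loop: x was there before, or x is a window of `t`
-- (at some scanned offset, of length L) that lies in the keyword set.
theorem pv_mem_window_fold (ak : PySem.Set (List Char)) (t : List Char) (L : Int) (x : List Char) :
    ∀ (is : List Int) (mt : PySem.Set (List Char)),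
    (x ∈ is.foldl (fun mt i =>
        let window := PySem.List.slice t (some i) (some (i + L))
        if ak.contains window then PySem.Set.add mt window else mt) mt)
    ↔ x ∈ mt ∨ ∃ i ∈ is, PySem.List.slice t (some i) (some (i + L)) = x ∧ ak.contains x = true := by
  intro is
  induction is with
  | nil => intro mt; simp
  | cons i is ih =>
    intro mt
    rw [List.foldl_cons]
    by_cases hc : ak.contains (PySem.List.slice t (some i) (some (i + L))) = true
    · show (x ∈ is.foldl _ ((if ak.contains _ then PySem.Set.add mt _ else mt))) ↔ _
      rw [if_pos hc, ih]
      rw [PySem.Set.mem_add]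
      constructor
      · rintro ((hx | rfl) | ⟨j, hj, hs, hcx⟩)
        · exact Or.inl hx
        · exact Or.inr ⟨i, List.mem_cons_self, rfl, hc⟩
        · exact Or.inr ⟨j, List.mem_cons_of_mem _ hj, hs, hcx⟩
      · rintro (hx | ⟨j, hj, hs, hcx⟩)
        · exact Or.inl (Or.inl hx)
        · rcases List.mem_cons.mp hj with rfl | hj'
          · exact Or.inl (Or.inr hs.symm)
          · exact Or.inr ⟨j, hj', hs, hcx⟩
    · show (x ∈ is.foldl _ ((if ak.contains _ then PySem.Set.add mt _ else mt))) ↔ _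
      rw [if_neg hc, ih]
      constructor
      · rintro (hx | ⟨j, hj, hs, hcx⟩)
        · exact Or.inl hx
        · exact Or.inr ⟨j, List.mem_cons_of_mem _ hj, hs, hcx⟩
      · rintro (hx | ⟨j, hj, hs, hcx⟩)
        · exact Or.inl hx
        · rcases List.mem_cons.mp hj with rfl | hj'
          · exact absurd (hs ▸ hcx) hc
          · exact Or.inr ⟨j, hj', hs, hcx⟩

-- Membership in `matched`: x is a window of `t` of some scanned length, in the keyword set.
theorem pv_mem_matched (ak : PySem.Set (List Char)) (t : List Char) (x : List Char) :
    ∀ (Ls : List Int) (mt0 : PySem.Set (List Char)),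
    (x ∈ Ls.foldl (fun mt L =>
        (PySem.List.pyRange 0 ((t.length : Int) - L + 1)).foldl (fun mt i =>
          let window := PySem.List.slice t (some i) (some (i + L))
          if ak.contains window then PySem.Set.add mt window else mt) mt) mt0)
    ↔ x ∈ mt0 ∨ ∃ L ∈ Ls, ∃ i : Int, 0 ≤ i ∧ i < (t.length : Int) - L + 1 ∧
        PySem.List.slice t (some i) (some (i + L)) = x ∧ ak.contains x = true := by
  intro Ls
  induction Ls with
  | nil => intro mt0; simp
  | cons L Ls ih =>
    intro mt0
    rw [List.foldl_cons, ih, pv_mem_window_fold]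
    constructor
    · rintro ((hx | ⟨i, hi, hs, hcx⟩) | ⟨L', hL', rest⟩)
      · exact Or.inl hx
      · obtain ⟨h0, h1⟩ := PySem.List.mem_pyRange_one.mp hi
        exact Or.inr ⟨L, List.mem_cons_self, i, h0, h1, hs, hcx⟩
      · exact Or.inr ⟨L', List.mem_cons_of_mem _ hL', rest⟩
    · rintro (hx | ⟨L', hL', i, h0, h1, hs, hcx⟩)
      · exact Or.inl (Or.inl hx)
      · rcases List.mem_cons.mp hL' with rfl | hL''
        · exact Or.inl (Or.inr ⟨i, PySem.List.mem_pyRange_one.mpr ⟨h0, h1⟩, hs, hcx⟩)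
        · exact Or.inr ⟨L', hL'', i, h0, h1, hs, hcx⟩

-- For a keyword s of the global keyword list, membership in `matched` is exactly
-- Python's `s in text`.
theorem pv_contains_matched (akList : List (List Char)) (t : List Char) (s : List Char)
    (hs : s ∈ akList) :
    (pvMatched (PySem.Set.ofList akList)
        (PySem.List.sorted
          (PySem.Set.ofList ((PySem.Set.ofList akList).map (fun kw => (kw.length : Int))))
          (fun x => x) false) t).contains s
      = PySem.Chars.isIn s t := by
  have hcs : (PySem.Set.ofList akList).contains s = true :=
    (PySem.Set.contains_iff _ _).mpr ((PySem.Set.mem_ofList _ _).mpr hs)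
  have hLmem : (s.length : Int) ∈
      PySem.List.sorted
        (PySem.Set.ofList ((PySem.Set.ofList akList).map (fun kw => (kw.length : Int))))
        (fun x => x) false := by
    rw [PySem.List.mem_sorted, PySem.Set.mem_ofList]
    exact List.mem_map_of_mem ((PySem.Set.mem_ofList _ _).mpr hs)
  cases hIn : PySem.Chars.isIn s t with
  | true =>
    -- s is an infix of t: the window at its offset puts it into matched
    obtain ⟨p, suf, hps⟩ := (PySem.Chars.isIn_iff_infix s t).mp hIn
    apply (PySem.Set.contains_iff _ _).mpr
    rw [pvMatched, pv_mem_matched]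
    refine Or.inr ⟨(s.length : Int), hLmem, (p.length : Int), by positivity, ?_, ?_, hcs⟩
    · have : t.length = p.length + s.length + suf.length := by
        rw [← hps]; simp; omega
      push_cast [this]; omega
    · rw [PySem.List.slice_natCast_add, ← hps]
      simp
  | false =>
    -- no window can equal s: every window is an infix of t
    cases hres : (pvMatched (PySem.Set.ofList akList) _ t).contains s with
    | false => rfl
    | true =>
      exfalso
      have hmem := (PySem.Set.contains_iff _ _).mp hres
      rw [pvMatched, pv_mem_matched] at hmem
      rcases hmem with hx | ⟨L, hL, i, h0, _, hsl, _⟩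
      · simp [PySem.Set.empty] at hx
      · have hL0 : 0 ≤ L := by
          rw [PySem.List.mem_sorted, PySem.Set.mem_ofList] at hL
          obtain ⟨kw, _, rfl⟩ := List.mem_map.mp hL
          positivity
        rw [PySem.List.slice_toNat t h0 (by omega)] at hsl
        have hinf : s <:+: t :=
          hsl ▸ (List.take_prefix _ _).isInfix.trans (List.drop_suffix _ _).isInfix
        rw [(PySem.Chars.isIn_iff_infix s t).mpr hinf] at hIn
        cases hIn

-- Per tag and text, B's tally over `matched` equals A's per-keyword substring count.
theorem pv_hit_eq (tags_config : List (String × List (String × List String)))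
    (e : String × List (String × List String)) (he : e ∈ tags_config) (t : List Char) :
    (pvKws e).countP (fun kw =>
        (pvMatched
          (PySem.Set.ofList ((tags_config.map (fun e => (e.1, pvKws e))).flatMap (fun p => p.2)))
          (PySem.List.sorted
            (PySem.Set.ofList
              ((PySem.Set.ofList
                  ((tags_config.map (fun e => (e.1, pvKws e))).flatMap (fun p => p.2))).map
                (fun kw => (kw.length : Int))))
            (fun x => x) false) t).contains kw)
      = ((PySem.Dict.getD ⟨e.2⟩ "indicators" []).filter (fun kw =>
          kw != "" && PySem.Chars.isIn (PySem.Chars.lower kw.toList) t)).length := by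
  rw [pvKws, List.countP_map, List.countP_filter, ← List.countP_eq_length_filter]
  apply List.countP_congr
  intro kw hkw
  simp only [Function.comp]
  by_cases hne : (kw != "") = true
  · have hmem : PySem.Chars.lower kw.toList ∈
        (tags_config.map (fun e => (e.1, pvKws e))).flatMap (fun p => p.2) := by
      apply List.mem_flatMap.mpr
      refine ⟨(e.1, pvKws e), List.mem_map_of_mem he, ?_⟩
      exact List.mem_map_of_mem (List.mem_filter.mpr ⟨hkw, hne⟩)
    rw [pv_contains_matched _ t _ hmem, hne]
    simp
  · have : (kw != "") = false := by simpa using hne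
    simp [this]

-- ===== VERDICT (by name: the statement is the Claim_ definition above) =====
theorem infer_domain_tags_spec : Claim_equal_infer_domain_tags := by
  intro morphisms tags_config top_k _hdom
  unfold Spec_infer_domain_tags
  simp only [infer_domain_tags, infer_domain_tags_alt]
  have hscores :
      morphisms.foldl (fun sc morphism =>
        let text := pvText morphism
        tags_config.foldl (fun sc e =>
          let indicators := PySem.Dict.getD ⟨e.2⟩ "indicators" []
          let hit : Int :=
            ((indicators.filter (fun kw =>
                kw != "" && PySem.Chars.isIn (PySem.Chars.lower kw.toList) text)).length : Nat)
          if hit ≠ 0 then sc.insert e.1 (sc.getD e.1 0 + hit) else sc) sc)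
        PySem.Dict.empty
      = morphisms.foldl (fun sc morphism =>
          let text := pvText morphism
          let matched := pvMatched
            (PySem.Set.ofList ((tags_config.map (fun e => (e.1, pvKws e))).flatMap (fun p => p.2)))
            (PySem.List.sorted
              (PySem.Set.ofList
                ((PySem.Set.ofList
                    ((tags_config.map (fun e => (e.1, pvKws e))).flatMap (fun p => p.2))).map
                  (fun kw => (kw.length : Int))))
              (fun x => x) false) text
          (tags_config.map (fun e => (e.1, pvKws e))).foldl (fun sc p =>
            let hit : Int := (p.2.countP (fun kw => matched.contains kw) : Nat)
            if hit ≠ 0 then sc.insert p.1 (sc.getD p.1 0 + hit) else sc) sc)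
          PySem.Dict.empty := by
    apply PySem.List.foldl_congr_mem
    intro sc m _
    rw [List.foldl_map]
    apply PySem.List.foldl_congr_mem
    intro acc e he
    show (if ((_ : Nat) : Int) ≠ 0 then _ else _) = (if ((_ : Nat) : Int) ≠ 0 then _ else _)
    rw [pv_hit_eq tags_config e he (pvText m)]
  rw [hscores]
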